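-- pv_equiv track=rewrite | github.com/katana108/playground | agents/sofico/current-build/src/services/document_library_service.py | _render_question_section
-- ===== SOURCE A (Python) =====
-- from typing import Any, Dict, List, Optional
--
-- def _render_question_section(questions: List[Dict[str, Any]]) -> str:
--     """Render stored questions back into the markdown review format."""
--     ordered_categories = ["Recall", "Explain", "Apply", "Connect"]
--     by_category: Dict[str, List[Dict[str, Any]]] = {name: [] for name in ordered_categories}
--     for question in questions:
--         category = str(question.get("category") or question.get("type") or "").strip().title()
--         if category not in by_category:
--             by_category.setdefault(category, [])
--         by_category[category].append(question)
--
--     lines = ["## Anki Questions", ""]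
--     number = 1
--     for category in ordered_categories:
--         items = by_category.get(category, [])
--         if not items:
--             continue
--         lines.append(f"### {category}")
--         lines.append("")
--         for question in items:
--             text = str(question.get("text") or "").strip()
--             answer = str(question.get("answer") or "").strip()
--             if not text or not answer:
--                 continue
--             lines.append(f"**Q{number}:** {text}")
--             lines.append(f"**A{number}:** {answer}")
--             lines.append("")
--             number += 1
--     return "\n".join(lines).rstrip()
-- ===== SOURCE B (Python) =====
-- from typing import Any, Dict, List
--
--
-- def _normalized_category(question: Dict[str, Any]) -> str:
--     return str(question.get("category") or question.get("type") or "").strip().title()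
--
--
-- def _render_question_section(questions: List[Dict[str, Any]]) -> str:
--     """Render stored questions back into the markdown review format.
--
--     No grouping dict: each fixed category filters the question list directly,
--     sharing one running question number."""
--     lines = ["## Anki Questions", ""]
--     number = 1
--     for category in ["Recall", "Explain", "Apply", "Connect"]:
--         items = [q for q in questions if _normalized_category(q) == category]
--         if not items:
--             continue
--         lines.append(f"### {category}")
--         lines.append("")
--         for question in items:
--             text = str(question.get("text") or "").strip()
--             answer = str(question.get("answer") or "").strip()
--             if text and answer:
--                 lines.append(f"**Q{number}:** {text}")
--                 lines.append(f"**A{number}:** {answer}")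
--                 lines.append("")
--                 number += 1
--     return "\n".join(lines).rstrip()
-- ===== Notes on version B (the rewrite author's own statement) =====
-- stated objective: simpler
-- what changed: Drops the by_category dict entirely: instead of one grouping pass that builds and then looks up buckets (including never-rendered buckets for unknown categories), B filters the question list once per fixed category and renders directly, keeping the shared number counter.
import Mathlib
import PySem

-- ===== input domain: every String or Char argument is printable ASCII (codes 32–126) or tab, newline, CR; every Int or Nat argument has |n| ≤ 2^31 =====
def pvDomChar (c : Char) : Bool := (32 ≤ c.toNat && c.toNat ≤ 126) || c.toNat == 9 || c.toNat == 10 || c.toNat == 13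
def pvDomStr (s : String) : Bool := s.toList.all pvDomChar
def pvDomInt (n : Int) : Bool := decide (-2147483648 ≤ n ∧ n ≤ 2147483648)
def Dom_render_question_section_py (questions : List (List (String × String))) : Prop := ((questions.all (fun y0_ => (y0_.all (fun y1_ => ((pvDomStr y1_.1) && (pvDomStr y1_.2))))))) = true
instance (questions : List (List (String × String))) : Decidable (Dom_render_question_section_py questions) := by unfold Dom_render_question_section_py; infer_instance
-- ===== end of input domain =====

-- B replaces A's one-pass grouping dict by a direct filter of the question list per fixed
-- category (simpler: no bucket index, no never-rendered buckets); same rendered markdown.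

-- ===== PORT A =====
-- shared field access: str(question.get(k) or ... or "") — None and "" are both falsy
def pvGetD (q : List (String × String)) (k : String) : String :=
  ((q.find? (fun p => p.1 == k)).map (·.2)).getD ""

-- Python str.title() on the ASCII domain: a letter after a letter is lowercased,
-- a letter after a non-letter (or at the start) is uppercased; others unchanged.
def pvTitleGo : Bool → List Char → List Char
  | _, [] => []
  | prev, c :: cs =>
    (if PySem.Chars.isalpha c then
       (if prev then PySem.Chars.lowerChar c else PySem.Chars.upperChar c)
     else c) :: pvTitleGo (PySem.Chars.isalpha c) cs

-- str(question.get("category") or question.get("type") or "").strip().title()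
def pvNorm (q : List (String × String)) : String :=
  String.ofList (pvTitleGo false
    (PySem.Str.strip (if pvGetD q "category" = "" then pvGetD q "type" else pvGetD q "category")).toList)

-- grouping-loop body of A
def pvStepGroup (d : PySem.Dict String (List (List (String × String))))
    (q : List (String × String)) : PySem.Dict String (List (List (String × String))) :=
  let category := pvNorm q
  let d := if d.contains category then d else d.setdefault category []
  d.modify category [] (· ++ [q])

-- inner rendering loop body of A (state: lines, number)
def pvInnerA (st : List String × Int) (q : List (String × String)) : List String × Int :=
  let text := PySem.Str.strip (pvGetD q "text")
  let answer := PySem.Str.strip (pvGetD q "answer")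
  if text = "" || answer = "" then st
  else (st.1 ++ ["**Q" ++ PySem.Int.toStr st.2 ++ ":** " ++ text,
                 "**A" ++ PySem.Int.toStr st.2 ++ ":** " ++ answer, ""], st.2 + 1)

-- category-loop body of A (items looked up in the grouping dict)
def pvStepCatA (byCat : PySem.Dict String (List (List (String × String))))
    (st : List String × Int) (category : String) : List String × Int :=
  let items := byCat.getD category []
  if items.isEmpty then st
  else List.foldl pvInnerA (st.1 ++ ["### " ++ category, ""], st.2) items

def render_question_section_py (questions : List (List (String × String))) : String :=
  let ordered : List String := ["Recall", "Explain", "Apply", "Connect"]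
  let byCat := questions.foldl pvStepGroup
    (ordered.foldl (fun d name => d.insert name []) PySem.Dict.empty)
  let st := ordered.foldl (pvStepCatA byCat) (["## Anki Questions", ""], (1 : Int))
  PySem.Str.rstrip (PySem.Str.join "\n" st.1)

-- ===== PORT B =====
-- render one category's filtered items, threading (lines, number)
def pvRenderItems : List (List (String × String)) → List String × Int → List String × Int
  | [], st => st
  | q :: rest, st =>
    let text := PySem.Str.strip (pvGetD q "text")
    let answer := PySem.Str.strip (pvGetD q "answer")
    if text = "" || answer = "" then pvRenderItems rest st
    else pvRenderItems rest
      (st.1 ++ ["**Q" ++ PySem.Int.toStr st.2 ++ ":** " ++ text,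
                "**A" ++ PySem.Int.toStr st.2 ++ ":** " ++ answer, ""], st.2 + 1)

-- walk the fixed category list; each category filters the questions directly
def pvRenderCats (questions : List (List (String × String))) :
    List String → List String × Int → List String × Int
  | [], st => st
  | cat :: cats, st =>
    let items := questions.filter (fun q => pvNorm q == cat)
    if items.isEmpty then pvRenderCats questions cats st
    else pvRenderCats questions cats (pvRenderItems items (st.1 ++ ["### " ++ cat, ""], st.2))

def render_question_section_py_alt (questions : List (List (String × String))) : String :=
  let st := pvRenderCats questions ["Recall", "Explain", "Apply", "Connect"]
    (["## Anki Questions", ""], (1 : Int))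
  PySem.Str.rstrip (PySem.Str.join "\n" st.1)

-- ===== PRECONDITION & SPEC =====
def Spec_render_question_section_py (questions : List (List (String × String))) (out : String) : Prop := out = render_question_section_py_alt questions
instance (questions : List (List (String × String))) (out : String) : Decidable (Spec_render_question_section_py questions out) := by unfold Spec_render_question_section_py; infer_instance

-- ===== CLAIM (what is proved, stated in full; the proofs are below) =====
def Claim_equal_render_question_section_py : Prop := ∀ (questions : List (List (String × String))), Dom_render_question_section_py questions → Spec_render_question_section_py questions (render_question_section_py questions)

-- ===== LEMMAS AND PROOFS =====

-- A's grouping loop fills the bucket of any already-present key with exactly the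
-- questions whose normalized category equals it, in order.
theorem pv_bucket (qs : List (List (String × String)))
    (d : PySem.Dict String (List (List (String × String)))) (cat : String)
    (h : d.contains cat = true) :
    (qs.foldl pvStepGroup d).getD cat [] = d.getD cat [] ++ qs.filter (fun q => pvNorm q == cat) := by
  induction qs generalizing d with
  | nil => simp
  | cons q rest ih =>
    simp only [List.foldl_cons, List.filter_cons]
    have hc : (pvStepGroup d q).contains cat = true := by
      simp only [pvStepGroup]
      split_ifs <;>
        simp [PySem.Dict.contains_modify, PySem.Dict.contains_setdefault, h]
    rw [ih _ hc]
    have hstep : (pvStepGroup d q).getD cat [] =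
        if pvNorm q == cat then d.getD cat [] ++ [q] else d.getD cat [] := by
      simp only [pvStepGroup]
      by_cases hq : pvNorm q = cat
      · subst hq
        rw [if_pos h, PySem.Dict.getD_modify]
        simp
      · have hne : cat ≠ pvNorm q := fun h' => hq h'.symm
        have hbe : (pvNorm q == cat) = false := by simp [hq]
        simp only [hbe, Bool.false_eq_true, if_false]
        rw [PySem.Dict.getD_modify, if_neg hne]
        split_ifs with hcont
        · rfl
        · rw [PySem.Dict.getD_eq_get?_getD, PySem.Dict.get?_setdefault_of_ne _ _ hne,
            ← PySem.Dict.getD_eq_get?_getD]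
    rw [hstep]
    split_ifs <;> simp

-- B's item recursion is A's inner fold.
theorem pv_items_eq (items : List (List (String × String))) (st : List String × Int) :
    pvRenderItems items st = List.foldl pvInnerA st items := by
  induction items generalizing st with
  | nil => rfl
  | cons q rest ih =>
    simp only [pvRenderItems, List.foldl_cons, pvInnerA]
    split_ifs with h <;> rw [ih]

-- If every listed category's bucket equals the direct filter, A's category fold
-- is B's category recursion.
theorem pv_cats_eq (qs : List (List (String × String)))
    (byCat : PySem.Dict String (List (List (String × String)))) (cats : List String)
    (h : ∀ c ∈ cats, byCat.getD c [] = qs.filter (fun q => pvNorm q == c)) :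
    ∀ st, cats.foldl (pvStepCatA byCat) st = pvRenderCats qs cats st := by
  induction cats with
  | nil => intro st; rfl
  | cons c cats ih =>
    intro st
    have hc := h c (by simp)
    simp only [List.foldl_cons, pvRenderCats, pvStepCatA, hc]
    rw [ih (fun c' hc' => h c' (by simp [hc']))]
    split_ifs with he
    · rfl
    · rw [pv_items_eq]

-- the seeded dict contains each of the four categories with an empty bucket
theorem pv_seed_contains (c : String) (hmem : c ∈ (["Recall", "Explain", "Apply", "Connect"] : List String)) :
    ((["Recall", "Explain", "Apply", "Connect"] : List String).foldl
      (fun d name => d.insert name ([] : List (List (String × String)))) PySem.Dict.empty).contains c = true := by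
  fin_cases hmem <;> decide

theorem pv_seed_getD (c : String) (hmem : c ∈ (["Recall", "Explain", "Apply", "Connect"] : List String)) :
    ((["Recall", "Explain", "Apply", "Connect"] : List String).foldl
      (fun d name => d.insert name ([] : List (List (String × String)))) PySem.Dict.empty).getD c [] = [] := by
  fin_cases hmem <;> decide

-- ===== VERDICT (by name: the statement is the Claim_ definition above) =====
theorem render_question_section_py_spec : Claim_equal_render_question_section_py := by
  intro questions _
  unfold Spec_render_question_section_py render_question_section_py render_question_section_py_alt
  dsimp only
  have h : ∀ c ∈ (["Recall", "Explain", "Apply", "Connect"] : List String),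
      (questions.foldl pvStepGroup
        ((["Recall", "Explain", "Apply", "Connect"] : List String).foldl
          (fun d name => d.insert name []) PySem.Dict.empty)).getD c []
        = questions.filter (fun q => pvNorm q == c) := by
    intro c hc
    rw [pv_bucket _ _ _ (pv_seed_contains c hc), pv_seed_getD c hc]
    simp
  rw [pv_cats_eq questions _ _ h]
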